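-- pv_equiv track=rewrite | github.com/tony-kuo/eagle | scripts/ref3_consensus.py | combinePE
-- ===== SOURCE A (Python) =====
-- def combinePE(data):
--     entry = {}
--     for key in data:
--         t = key.strip().split('\t')
--         if t[0] not in entry:
--             entry[t[0]] = data[key]
--         elif t[0] in entry:
--             entry[t[0]] = (entry[t[0]][0], entry[t[0]][1] + data[key][1], entry[t[0]][2] + data[key][2], entry[t[0]][3] + data[key][3], max(entry[t[0]][4], data[key][4]))
--     return(entry)
-- ===== SOURCE B (Python) =====
-- def combinePE(data):
--     # group-then-reduce: first bucket every value under its first tab field,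
--     # then collapse each bucket left-to-right
--     groups = {}
--     for key in data:
--         groups.setdefault(key.strip().split('\t')[0], []).append(data[key])
--     out = {}
--     for k, vs in groups.items():
--         acc = vs[0]
--         for nxt in vs[1:]:
--             acc = (acc[0], acc[1] + nxt[1], acc[2] + nxt[2], acc[3] + nxt[3], max(acc[4], nxt[4]))
--         out[k] = acc
--     return out
-- ===== Notes on version B (the rewrite author's own statement) =====
-- stated objective: alternative
-- what changed: A accumulates combined tuples into the result dict as it scans; B first groups all values into per-key lists in one pass and then collapses each group with a separate left fold (group-then-reduce decomposition).
import Mathlib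
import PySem

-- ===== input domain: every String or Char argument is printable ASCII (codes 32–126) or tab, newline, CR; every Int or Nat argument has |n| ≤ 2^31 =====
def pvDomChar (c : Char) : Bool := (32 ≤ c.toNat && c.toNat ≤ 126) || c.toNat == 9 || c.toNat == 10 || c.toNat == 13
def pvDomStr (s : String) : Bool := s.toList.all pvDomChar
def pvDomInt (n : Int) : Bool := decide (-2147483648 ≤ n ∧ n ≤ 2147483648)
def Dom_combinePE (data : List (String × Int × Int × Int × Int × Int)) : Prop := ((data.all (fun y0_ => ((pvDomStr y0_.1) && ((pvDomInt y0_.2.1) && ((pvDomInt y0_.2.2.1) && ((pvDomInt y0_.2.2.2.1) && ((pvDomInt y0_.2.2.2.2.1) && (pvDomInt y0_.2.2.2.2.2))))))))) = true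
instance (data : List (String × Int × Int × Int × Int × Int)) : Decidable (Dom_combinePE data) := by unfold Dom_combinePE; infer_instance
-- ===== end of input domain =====

-- B groups the values per first tab field in one pass and then collapses each
-- group with a separate left fold (group-then-reduce), instead of A's
-- accumulate-as-you-go single dict loop; same cost, different decomposition.

-- key.strip().split('\t')[0] (split never returns an empty list, so index 0 is safe)
def pvKey0 (s : String) : String :=
  PySem.List.pyGetD ((PySem.Str.split? (PySem.Str.strip s) "\t").getD []) 0 ""

-- ===== PORT A =====
def pvStepA (entry : PySem.Dict String (Int × Int × Int × Int × Int))
    (kv : String × Int × Int × Int × Int × Int) :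
    PySem.Dict String (Int × Int × Int × Int × Int) :=
  let t0 := pvKey0 kv.1
  if entry.contains t0 = false then
    entry.insert t0 kv.2
  else if entry.contains t0 = true then
    let old := entry.getD t0 (0, 0, 0, 0, 0)  -- entry[t0]; present in this branch
    entry.insert t0 (old.1, old.2.1 + kv.2.2.1, old.2.2.1 + kv.2.2.2.1,
      old.2.2.2.1 + kv.2.2.2.2.1, max old.2.2.2.2 kv.2.2.2.2.2)
  else entry

def combinePE (data : List (String × Int × Int × Int × Int × Int)) : List (String × Int × Int × Int × Int × Int) :=
  (data.foldl pvStepA PySem.Dict.empty).items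

-- ===== PORT B =====
-- the combiner applied left-to-right inside one group
def pvComb (a n : Int × Int × Int × Int × Int) : Int × Int × Int × Int × Int :=
  (a.1, a.2.1 + n.2.1, a.2.2.1 + n.2.2.1, a.2.2.2.1 + n.2.2.2.1, max a.2.2.2.2 n.2.2.2.2)

-- acc = vs[0]; for nxt in vs[1:]: acc = comb(acc, nxt)   (groups are never empty)
def pvReduce (vs : List (Int × Int × Int × Int × Int)) : Int × Int × Int × Int × Int :=
  match vs with
  | [] => (0, 0, 0, 0, 0)  -- unreachable: every group holds at least one value
  | a :: rest => rest.foldl pvComb a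

def pvStepB (g : PySem.Dict String (List (Int × Int × Int × Int × Int)))
    (kv : String × Int × Int × Int × Int × Int) :
    PySem.Dict String (List (Int × Int × Int × Int × Int)) :=
  g.modify (pvKey0 kv.1) [] (· ++ [kv.2])  -- setdefault(k, []).append(v)

def combinePE_alt (data : List (String × Int × Int × Int × Int × Int)) : List (String × Int × Int × Int × Int × Int) :=
  ((data.foldl pvStepB PySem.Dict.empty).items).map (fun p => (p.1, pvReduce p.2))

-- ===== PRECONDITION & SPEC =====
def Spec_combinePE (data : List (String × Int × Int × Int × Int × Int)) (out : List (String × Int × Int × Int × Int × Int)) : Prop := out = combinePE_alt data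
instance (data : List (String × Int × Int × Int × Int × Int)) (out : List (String × Int × Int × Int × Int × Int)) : Decidable (Spec_combinePE data out) := by unfold Spec_combinePE; infer_instance

-- ===== CLAIM (what is proved, stated in full; the proofs are below) =====
def Claim_equal_combinePE : Prop := ∀ (data : List (String × Int × Int × Int × Int × Int)), Dom_combinePE data → Spec_combinePE data (combinePE data)

-- ===== LEMMAS AND PROOFS =====

-- the itemwise bridge between A's combined tuples and B's grouped value lists
def pvF (p : String × List (Int × Int × Int × Int × Int)) : String × Int × Int × Int × Int × Int :=
  (p.1, pvReduce p.2)

theorem pvReduce_append (vs : List (Int × Int × Int × Int × Int)) (hvs : vs ≠ [])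
    (v : Int × Int × Int × Int × Int) : pvReduce (vs ++ [v]) = pvComb (pvReduce vs) v := by
  match vs with
  | [] => exact absurd rfl hvs
  | a :: rest => simp [pvReduce, List.foldl_append]

theorem pv_keys_eq (e : PySem.Dict String (Int × Int × Int × Int × Int))
    (g : PySem.Dict String (List (Int × Int × Int × Int × Int)))
    (h : e.items = g.items.map pvF) : e.keys = g.keys := by
  simp only [PySem.Dict.keys, h, List.map_map]
  rfl

theorem pv_stepA_eq (e : PySem.Dict String (Int × Int × Int × Int × Int))
    (kv : String × Int × Int × Int × Int × Int) :
    pvStepA e kv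
      = (if e.contains (pvKey0 kv.1) = true
          then e.insert (pvKey0 kv.1) (pvComb (e.getD (pvKey0 kv.1) (0, 0, 0, 0, 0)) kv.2)
          else e.insert (pvKey0 kv.1) kv.2) := by
  by_cases hc : e.contains (pvKey0 kv.1) = true
  · simp only [pvStepA, pvComb, hc, Bool.true_eq_false, if_false, if_true]
  · have hc' : e.contains (pvKey0 kv.1) = false := by simpa using hc
    simp only [pvStepA, hc', if_true, Bool.false_eq_true, if_false]

theorem pv_stepB_eq (g : PySem.Dict String (List (Int × Int × Int × Int × Int)))
    (kv : String × Int × Int × Int × Int × Int) :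
    pvStepB g kv = g.insert (pvKey0 kv.1) (g.getD (pvKey0 kv.1) [] ++ [kv.2]) := by
  simp only [pvStepB, PySem.Dict.modify]

theorem pv_main (l : List (String × Int × Int × Int × Int × Int))
    (e : PySem.Dict String (Int × Int × Int × Int × Int))
    (g : PySem.Dict String (List (Int × Int × Int × Int × Int)))
    (hitems : e.items = g.items.map pvF)
    (hnd : g.keys.Nodup)
    (hne : ∀ p ∈ g.items, p.2 ≠ []) :
    (l.foldl pvStepA e).items = (l.foldl pvStepB g).items.map pvF := by
  induction l generalizing e g with
  | nil => simp only [List.foldl_nil]; exact hitems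
  | cons kv rest ih =>
    simp only [List.foldl_cons]
    have hkeys : e.keys = g.keys := pv_keys_eq e g hitems
    have hende : e.keys.Nodup := hkeys ▸ hnd
    have hcont : ∀ k, e.contains k = g.contains k := by
      intro k
      rw [PySem.Dict.contains_eq_decide_mem_keys, PySem.Dict.contains_eq_decide_mem_keys, hkeys]
    rw [pv_stepA_eq e kv, pv_stepB_eq g kv]
    -- the key string is opaque from here on
    generalize pvKey0 kv.1 = k0
    by_cases hc : g.contains k0 = true
    · -- key already present: A combines in place, B appends to the group
      have hce : e.contains k0 = true := by rw [hcont]; exact hc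
      rw [if_pos hce]
      obtain ⟨vs, hvsmem⟩ : ∃ vs, (k0, vs) ∈ g.items := by
        have hmem : k0 ∈ g.keys := (PySem.Dict.contains_iff_mem_keys g _).mp hc
        simp only [PySem.Dict.keys, List.mem_map] at hmem
        obtain ⟨p, hp, hp1⟩ := hmem
        exact ⟨p.2, by rw [← hp1]; exact hp⟩
      have hgD : g.getD k0 [] = vs := PySem.Dict.getD_of_mem_items g hvsmem hnd []
      have heD : e.getD k0 (0, 0, 0, 0, 0) = pvReduce vs := by
        have hm : (k0, pvReduce vs) ∈ e.items := by
          rw [hitems]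
          exact List.mem_map.mpr ⟨(k0, vs), hvsmem, rfl⟩
        exact PySem.Dict.getD_of_mem_items e hm hende _
      have hvs_ne : vs ≠ [] := hne _ hvsmem
      rw [hgD, heD]
      apply ih
      · rw [PySem.Dict.items_insert_of_contains e _ hce,
            PySem.Dict.items_insert_of_contains g _ hc, hitems,
            List.map_map, List.map_map]
        apply List.map_congr_left
        intro p hp
        by_cases hpk : p.1 = k0
        · have hpvs : p.2 = vs := by
            have hinj : (g.items.map (·.1)).Nodup := by
              simpa only [PySem.Dict.keys] using hnd
            have hpe := List.inj_on_of_nodup_map hinj hp hvsmem (by simpa using hpk)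
            rw [hpe]
          simp only [Function.comp, pvF, hpk, hpvs, beq_self_eq_true, if_true]
          rw [pvReduce_append vs hvs_ne]
        · have hbeq : (p.1 == k0) = false := by simpa using hpk
          simp only [Function.comp, pvF, hbeq, Bool.false_eq_true, if_false]
      · rw [PySem.Dict.keys_insert_of_contains g _ hc]; exact hnd
      · intro p hp
        rcases (PySem.Dict.mem_items_insert _ _ _ _).mp hp with h | ⟨h, _⟩
        · simp only [h]; simp
        · exact hne _ h
    · -- new key: both sides append a fresh entry
      have hc' : g.contains k0 = false := by simpa using hc
      have hce : e.contains k0 = false := by rw [hcont]; exact hc'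
      have hgD : g.getD k0 [] = [] := PySem.Dict.getD_of_not_contains g [] hc'
      rw [if_neg (by simp [hce]), hgD, List.nil_append]
      apply ih
      · rw [PySem.Dict.items_insert_of_not_contains e _ hce,
            PySem.Dict.items_insert_of_not_contains g _ hc', hitems]
        simp only [List.map_append, List.map_cons, List.map_nil, pvF, pvReduce, List.foldl_nil]
      · rw [PySem.Dict.keys_insert_of_not_contains g _ hc']
        refine List.Nodup.append hnd (List.nodup_singleton _) ?_
        intro a ha hb
        simp only [List.mem_singleton] at hb
        subst hb
        exact absurd ((PySem.Dict.contains_iff_mem_keys g _).mpr ha) (by simp [hc'])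
      · intro p hp
        rcases (PySem.Dict.mem_items_insert _ _ _ _).mp hp with h | ⟨h, _⟩
        · simp only [h]; simp
        · exact hne _ h

-- ===== VERDICT (by name: the statement is the Claim_ definition above) =====
theorem combinePE_spec : Claim_equal_combinePE := by
  intro data _
  unfold Spec_combinePE combinePE combinePE_alt
  exact pv_main data PySem.Dict.empty PySem.Dict.empty (by rfl) (by constructor) (by intro p hp; cases hp)
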